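-- pv_equiv track=rewrite | github.com/Leonardo-Gianola/dgm_bachelor_thesis | benchmarks/swe_verified_report.py | remove_patches_to_tests
-- ===== SOURCE A (Python) =====
-- def remove_patches_to_tests(model_patch):
--     lines = model_patch.splitlines(keepends=True)
--     filtered_lines = []
--     is_tests = False
--
--     for line in lines:
--         if line.startswith("diff --git a/"):
--             pieces = line.split()
--             to = pieces[-1]
--             if to.startswith("b/") and (
--                 "/test/" in to
--                 or "/tests/" in to
--                 or "/testing/" in to
--                 or "/test_" in to
--                 or "/tox.ini" in to
--             ):
--                 is_tests = True
--             else: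
--                 is_tests = False
--
--         if not is_tests:
--             filtered_lines.append(line)
--
--     return "".join(filtered_lines)
-- ===== SOURCE B (Python) =====
-- def remove_patches_to_tests(model_patch):
--     lines = model_patch.splitlines(keepends=True)
--     blocks = []
--     cur = []
--     for line in lines:
--         if line.startswith("diff --git a/"):
--             blocks.append(cur)
--             cur = [line]
--         else:
--             cur.append(line)
--     blocks.append(cur)
--
--     def is_test_block(block):
--         if not block or not block[0].startswith("diff --git a/"):
--             return False
--         to = block[0].split()[-1]
--         return to.startswith("b/") and any(
--             m in to for m in ("/test/", "/tests/", "/testing/", "/test_", "/tox.ini")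
--         )
--
--     return "".join("".join(b) for b in blocks if not is_test_block(b))
-- ===== Notes on version B (the rewrite author's own statement) =====
-- stated objective: alternative
-- what changed: B replaces A's line-by-line loop with a mutable is_tests flag by a two-phase block decomposition: group the lines into diff-header-delimited blocks (lines before the first header form an always-kept leading block), drop each block whose header's last token targets a test path, and join the kept blocks.
import Mathlib
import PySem

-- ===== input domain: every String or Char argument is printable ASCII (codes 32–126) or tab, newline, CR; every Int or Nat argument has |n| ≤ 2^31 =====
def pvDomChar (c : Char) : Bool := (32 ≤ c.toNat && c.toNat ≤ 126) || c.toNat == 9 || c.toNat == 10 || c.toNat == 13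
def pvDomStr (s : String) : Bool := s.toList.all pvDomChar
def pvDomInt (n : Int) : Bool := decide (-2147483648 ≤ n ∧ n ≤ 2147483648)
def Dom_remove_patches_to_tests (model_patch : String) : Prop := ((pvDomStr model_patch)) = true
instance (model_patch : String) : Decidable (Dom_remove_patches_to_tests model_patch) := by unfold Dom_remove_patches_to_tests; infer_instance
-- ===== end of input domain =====

-- B re-decomposes the filter as: split the patch into diff-header-delimited blocks, drop whole
-- test-targeting blocks, join the rest ('alternative' objective, same cost; return value proved equal).

-- shared helper: model_patch.splitlines(keepends=True), ported by hand.
-- Exact for the line boundaries '\n', '\r', '\r\n' — the only line boundaries among the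
-- characters admitted by Dom_remove_patches_to_tests (printable ASCII + tab + '\n' + '\r').
def pvSplitKeep : List Char → List Char → List (List Char)
  | [], acc => if acc = [] then [] else [acc.reverse]
  | '\r' :: '\n' :: rest, acc => (acc.reverse ++ ['\r', '\n']) :: pvSplitKeep rest []
  | '\r' :: rest, acc => (acc.reverse ++ ['\r']) :: pvSplitKeep rest []
  | '\n' :: rest, acc => (acc.reverse ++ ['\n']) :: pvSplitKeep rest []
  | c :: rest, acc => pvSplitKeep rest (c :: acc)

def pvHeader : List Char := "diff --git a/".toList

-- shared helper: the test on the header's last token (identical text in A and B)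
def pvIsTestTo (tk : List Char) : Bool :=
  PySem.Chars.startswith tk "b/".toList &&
  (PySem.Chars.isIn "/test/".toList tk ||
   PySem.Chars.isIn "/tests/".toList tk ||
   PySem.Chars.isIn "/testing/".toList tk ||
   PySem.Chars.isIn "/test_".toList tk ||
   PySem.Chars.isIn "/tox.ini".toList tk)

-- ===== PORT A =====
-- A's loop: is_tests is updated at each header line, then the line is kept iff not is_tests.
-- pieces[-1] : the line starts with "diff --git a/", so line.split() is nonempty; getLastD is its last element.
def pvALoop : List (List Char) → Bool → List (List Char)
  | [], _ => []
  | line :: rest, is_tests =>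
    let is_tests' :=
      if PySem.Chars.startswith line pvHeader then
        pvIsTestTo ((PySem.Chars.split₀ line).getLastD [])
      else is_tests
    if is_tests' then pvALoop rest is_tests' else line :: pvALoop rest is_tests'

def remove_patches_to_tests (model_patch : String) : String :=
  String.ofList (PySem.Chars.join [] (pvALoop (pvSplitKeep model_patch.toList []) false))

-- ===== PORT B =====
-- B's grouping loop: state (blocks, cur); a header line closes cur and starts a new block.
def pvStep (st : List (List (List Char)) × List (List Char)) (line : List Char) :
    List (List (List Char)) × List (List Char) :=
  if PySem.Chars.startswith line pvHeader then (st.1 ++ [st.2], [line])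
  else (st.1, st.2 ++ [line])

def pvIsTestBlock (b : List (List Char)) : Bool :=
  match b with
  | [] => false
  | first :: _ =>
    PySem.Chars.startswith first pvHeader &&
    pvIsTestTo ((PySem.Chars.split₀ first).getLastD [])

def remove_patches_to_tests_alt (model_patch : String) : String :=
  let lines := pvSplitKeep model_patch.toList []
  let st := lines.foldl pvStep ([], [])
  let blocks := st.1 ++ [st.2]
  String.ofList (PySem.Chars.join []
    ((blocks.filter (fun b => !pvIsTestBlock b)).map (PySem.Chars.join [])))

-- ===== PRECONDITION & SPEC =====
def Spec_remove_patches_to_tests (model_patch : String) (out : String) : Prop := out = remove_patches_to_tests_alt model_patch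
instance (model_patch : String) (out : String) : Decidable (Spec_remove_patches_to_tests model_patch out) := by unfold Spec_remove_patches_to_tests; infer_instance

-- ===== CLAIM (what is proved, stated in full; the proofs are below) =====
def Claim_equal_remove_patches_to_tests : Prop := ∀ (model_patch : String), Dom_remove_patches_to_tests model_patch → Spec_remove_patches_to_tests model_patch (remove_patches_to_tests model_patch)

-- ===== LEMMAS AND PROOFS =====

theorem pvJoinNil (xs : List (List Char)) : PySem.Chars.join [] xs = xs.flatten := by
  simp only [PySem.Chars.join, List.intercalate]
  induction xs with
  | nil => simp
  | cons a t ih => cases t <;> simp_all [List.intersperse]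

-- join of the kept blocks, in flatten form
def pvKept (bs : List (List (List Char))) : List Char :=
  ((bs.filter (fun b => !pvIsTestBlock b)).map List.flatten).flatten

theorem pvKept_append (bs cs : List (List (List Char))) :
    pvKept (bs ++ cs) = pvKept bs ++ pvKept cs := by
  simp [pvKept]

theorem pvKept_single (b : List (List Char)) :
    pvKept [b] = if pvIsTestBlock b then [] else b.flatten := by
  by_cases h : pvIsTestBlock b <;> simp [pvKept, h]

theorem pvIsTestBlock_snoc (b : List (List Char)) (line : List Char)
    (h : PySem.Chars.startswith line pvHeader = false) :
    pvIsTestBlock (b ++ [line]) = pvIsTestBlock b := by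
  cases b with
  | nil => simp [pvIsTestBlock, h]
  | cons f t => simp [pvIsTestBlock]

theorem pvFoldl_shift (lines : List (List Char)) :
    ∀ (blocks : List (List (List Char))) (cur : List (List Char)),
      lines.foldl pvStep (blocks, cur) =
      (blocks ++ (lines.foldl pvStep ([], cur)).1, (lines.foldl pvStep ([], cur)).2) := by
  induction lines with
  | nil => intro blocks cur; simp
  | cons line rest ih =>
    intro blocks cur
    by_cases h : PySem.Chars.startswith line pvHeader
    · simp only [List.foldl_cons, pvStep, h, if_pos]
      simp only [List.nil_append]
      rw [ih (blocks ++ [cur]) [line], ih [cur] [line]]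
      simp
    · simp only [List.foldl_cons, pvStep, h, if_neg, Bool.false_eq_true, not_false_iff]
      exact ih blocks (cur ++ [line])

theorem pvMain (lines : List (List Char)) :
    ∀ (cur : List (List Char)),
      pvKept ((lines.foldl pvStep ([], cur)).1 ++ [(lines.foldl pvStep ([], cur)).2]) =
      (if pvIsTestBlock cur then [] else cur.flatten) ++
        (pvALoop lines (pvIsTestBlock cur)).flatten := by
  induction lines with
  | nil => intro cur; simp [pvALoop, pvKept_single]
  | cons line rest ih =>
    intro cur
    by_cases h : PySem.Chars.startswith line pvHeader
    · have hblk : pvIsTestBlock [line] =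
          pvIsTestTo ((PySem.Chars.split₀ line).getLastD []) := by
        simp [pvIsTestBlock, h]
      simp only [List.foldl_cons, pvStep, h, if_pos, List.nil_append]
      rw [pvFoldl_shift rest [cur] [line], List.append_assoc, pvKept_append, pvKept_single,
        ih [line], hblk]
      simp only [pvALoop, h, if_pos]
      cases hT : pvIsTestTo ((PySem.Chars.split₀ line).getLastD []) <;>
        by_cases hc : pvIsTestBlock cur <;> simp [hc]
    · have hb : PySem.Chars.startswith line pvHeader = false := by
        simpa using h
      simp only [List.foldl_cons, pvStep, hb, Bool.false_eq_true, if_neg, not_false_iff]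
      rw [ih (cur ++ [line]), pvIsTestBlock_snoc cur line hb]
      simp only [pvALoop, hb, Bool.false_eq_true, if_neg, not_false_iff]
      by_cases hc : pvIsTestBlock cur <;> simp [hc]

-- ===== VERDICT (by name: the statement is the Claim_ definition above) =====
theorem remove_patches_to_tests_spec : Claim_equal_remove_patches_to_tests := by
  intro model_patch _
  unfold Spec_remove_patches_to_tests remove_patches_to_tests remove_patches_to_tests_alt
  have hj : PySem.Chars.join ([] : List Char) = List.flatten := funext pvJoinNil
  have h2 : pvKept (((pvSplitKeep model_patch.toList []).foldl pvStep ([], [])).1 ++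
      [((pvSplitKeep model_patch.toList []).foldl pvStep ([], [])).2]) =
      (pvALoop (pvSplitKeep model_patch.toList []) false).flatten := by
    simpa [pvIsTestBlock] using pvMain (pvSplitKeep model_patch.toList []) []
  simp only [hj, pvKept] at h2 ⊢
  rw [h2]
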